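-- pv_equiv track=rewrite | github.com/roadsidegravel/cyber-dojo | 003 bowling game Python unittest/bowlingScore.py | convert_score_to_number_list
-- ===== SOURCE A (Python) =====
-- def convert_score_to_number_list(score):
--     result = []
--     game = score+'!'
--     splitGame = game.split('!')
--     balls = splitGame[0]
--     bonusBalls = splitGame[1]
--     allBalls = balls + bonusBalls + '00'
--     for index,char in enumerate(balls):
--         number = 0
--         if char.isdigit():
--             number += int(char)
--         elif char == '/':
--             previousScore = int(game[index-1])
--             number += 10 - previousScore
--             nextBall = allBalls[index+1]
--             nextBall = nextBall.replace('X', '10')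
--             bonusScore = int(nextBall)
--             number += bonusScore
--         elif char == 'X':
--             number += 10
--             nextBall = allBalls[index+1]
--             nexterBall = allBalls[index+2]
--             if nexterBall == '/':
--                 bonusScore = 10
--             else:
--                 nextBall = nextBall.replace('X', '10')
--                 nexterBall = nexterBall.replace('X', '10')
--                 bonusScore = int(nextBall) + int(nexterBall)
--             number +=bonusScore
--         else:
--             raise Exception(f'symbol {char} in score not understood. {score}')
--         result.append(number)
--     return result
-- ===== SOURCE B (Python) =====
-- def convert_score_to_number_list(score):
--     parts = (score + '!').split('!')
--     balls = parts[0]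
--     bonus = parts[1]
--     allBalls = balls + bonus + '00'
--     # first pass: intrinsic value of every ball in the sequence
--     vals = []
--     for c in allBalls:
--         if c.isdigit():
--             v = int(c)
--         elif c == 'X':
--             v = 10
--         elif c == '/':
--             v = 10 - (vals[-1] if vals else 0)
--         else:
--             v = 0
--         vals.append(v)
--     # second pass: per-ball score of the main game
--     result = []
--     for i, c in enumerate(balls):
--         if c.isdigit():
--             result.append(vals[i])
--         elif c == '/':
--             result.append(vals[i] + vals[i + 1])
--         elif c == 'X':
--             result.append(10 + vals[i + 1] + vals[i + 2])
--         else: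
--             raise Exception(f'symbol {c} in score not understood. {score}')
--     return result
-- ===== Notes on version B (the rewrite author's own statement) =====
-- stated objective: alternative
-- what changed: B replaces A's per-ball lookahead (raw-string re-indexing, character substitution and re-parsing, plus a special case for a spare right after a strike) by a two-pass table scheme: one pass assigns every ball its intrinsic value (digit value, ten for a strike, ten minus the previous value for a spare), a second pass sums table entries, which makes the strike-then-spare special case disappear.
import Mathlib
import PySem

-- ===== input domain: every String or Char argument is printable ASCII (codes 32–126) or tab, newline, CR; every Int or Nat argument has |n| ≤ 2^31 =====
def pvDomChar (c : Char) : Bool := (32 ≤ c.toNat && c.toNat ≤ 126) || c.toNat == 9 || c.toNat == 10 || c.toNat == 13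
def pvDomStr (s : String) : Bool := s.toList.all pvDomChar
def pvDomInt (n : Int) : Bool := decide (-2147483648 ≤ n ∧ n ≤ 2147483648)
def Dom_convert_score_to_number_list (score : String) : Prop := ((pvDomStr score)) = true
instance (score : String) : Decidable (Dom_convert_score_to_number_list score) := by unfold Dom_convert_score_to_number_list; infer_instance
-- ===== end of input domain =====

-- B replaces A's per-ball lookahead (raw-string re-indexing, character substitution and re-parsing,
-- strike-then-spare special case) by two passes: a table of intrinsic per-ball values, then a summing
-- pass over it (objective: alternative decomposition).

-- ===== PORT A =====
def convert_score_to_number_list (score : String) : List Int :=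
  let game : List Char := score.toList ++ ['!']
  let splitGame := PySem.Chars.splitOn game ['!']
  let balls := splitGame.getD 0 []
  let bonusBalls := splitGame.getD 1 []
  let allBalls := balls ++ bonusBalls ++ ['0', '0']
  (PySem.List.enumerate balls).foldl (fun result ic =>
    let index := ic.1
    let char := ic.2
    let number : Int :=
      if PySem.Chars.isdigit char then
        (PySem.Int.ofChars? [char]).getD 0
      else if char = '/' then
        let previousScore := (PySem.Int.ofChars? [PySem.List.pyGetD game (index - 1) ' ']).getD 0
        let nextBall := PySem.Chars.replace [PySem.List.pyGetD allBalls (index + 1) ' '] ['X'] ['1', '0']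
        (10 - previousScore) + (PySem.Int.ofChars? nextBall).getD 0
      else if char = 'X' then
        let nextBall := [PySem.List.pyGetD allBalls (index + 1) ' ']
        let nexterBall := [PySem.List.pyGetD allBalls (index + 2) ' ']
        let bonusScore : Int :=
          if nexterBall = ['/'] then 10
          else (PySem.Int.ofChars? (PySem.Chars.replace nextBall ['X'] ['1', '0'])).getD 0
               + (PySem.Int.ofChars? (PySem.Chars.replace nexterBall ['X'] ['1', '0'])).getD 0
        10 + bonusScore
      else 0  -- Python raises Exception here; excluded by Pre_
    result ++ [number]) []

-- ===== PORT B =====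
def convert_score_to_number_list_alt (score : String) : List Int :=
  let parts := PySem.Chars.splitOn (score.toList ++ ['!']) ['!']
  let balls := parts.getD 0 []
  let bonus := parts.getD 1 []
  let allBalls := balls ++ bonus ++ ['0', '0']
  let vals : List Int := allBalls.foldl (fun vals c =>
    vals ++ [if PySem.Chars.isdigit c then (PySem.Int.ofChars? [c]).getD 0
             else if c = 'X' then 10
             else if c = '/' then 10 - (if vals.isEmpty then 0 else PySem.List.pyGetD vals (-1) 0)
             else 0]) []
  (PySem.List.enumerate balls).foldl (fun result ic =>
    let i := ic.1
    let c := ic.2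
    if PySem.Chars.isdigit c then result ++ [PySem.List.pyGetD vals i 0]
    else if c = '/' then result ++ [PySem.List.pyGetD vals i 0 + PySem.List.pyGetD vals (i + 1) 0]
    else if c = 'X' then result ++ [10 + PySem.List.pyGetD vals (i + 1) 0 + PySem.List.pyGetD vals (i + 2) 0]
    else result  -- Python raises Exception here; excluded by Pre_
    ) []

-- ===== PRECONDITION & SPEC =====
-- helper shapes for Pre_ (the main balls and the full ball sequence, as both Pythons parse them)
def pvBalls (score : String) : List Char :=
  (PySem.Chars.splitOn (score.toList ++ ['!']) ['!']).getD 0 []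
def pvAll (score : String) : List Char :=
  pvBalls score ++ (PySem.Chars.splitOn (score.toList ++ ['!']) ['!']).getD 1 [] ++ ['0', '0']

-- Pre_ holds exactly where Python A returns normally: every main-game ball is a digit, a spare
-- preceded by a digit ball (not in first position) and followed by a digit/strike ball, or a
-- strike whose two following balls are a digit/strike pair or end in a spare.
def Pre_convert_score_to_number_list (score : String) : Prop :=
  ∀ i, i < (pvBalls score).length →
    PySem.Chars.isdigit ((pvBalls score).getD i ' ') = true ∨
    ((pvBalls score).getD i ' ' = '/' ∧ 1 ≤ i ∧
      PySem.Chars.isdigit ((pvBalls score).getD (i - 1) ' ') = true ∧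
      (PySem.Chars.isdigit ((pvAll score).getD (i + 1) ' ') = true ∨ (pvAll score).getD (i + 1) ' ' = 'X')) ∨
    ((pvBalls score).getD i ' ' = 'X' ∧
      ((pvAll score).getD (i + 2) ' ' = '/' ∨
        ((PySem.Chars.isdigit ((pvAll score).getD (i + 1) ' ') = true ∨ (pvAll score).getD (i + 1) ' ' = 'X') ∧
         (PySem.Chars.isdigit ((pvAll score).getD (i + 2) ' ') = true ∨ (pvAll score).getD (i + 2) ' ' = 'X'))))

instance (score : String) : Decidable (Pre_convert_score_to_number_list score) := by
  unfold Pre_convert_score_to_number_list; infer_instance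

def pvWitness_convert_score_to_number_list : String := "9/X45"

def Spec_convert_score_to_number_list (score : String) (out : List Int) : Prop := out = convert_score_to_number_list_alt score
instance (score : String) (out : List Int) : Decidable (Spec_convert_score_to_number_list score out) := by unfold Spec_convert_score_to_number_list; infer_instance

-- ===== CLAIM (what is proved, stated in full; the proofs are below) =====
def Claim_equal_convert_score_to_number_list : Prop := ∀ (score : String), Dom_convert_score_to_number_list score → Pre_convert_score_to_number_list score → Spec_convert_score_to_number_list score (convert_score_to_number_list score)

-- ===== LEMMAS AND PROOFS =====

-- The head of splitOn g ['!'] is the longest '!'-free prefix of g.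
theorem pv_go_head : ∀ (fuel : Nat) (s cur : List Char) (acc : List (List Char)), s.length ≤ fuel →
    ∃ rest, PySem.Chars.splitOn.go ['!'] fuel s cur acc
      = acc.reverse ++ (cur.reverse ++ s.takeWhile (· ≠ '!')) :: rest := by
  intro fuel
  induction fuel with
  | zero =>
    intro s cur acc hs
    have h0 : s = [] := List.eq_nil_of_length_eq_zero (Nat.le_zero.mp hs)
    subst h0
    exact ⟨[], by simp [PySem.Chars.splitOn.go]⟩
  | succ n ih =>
    intro s cur acc hs
    cases s with
    | nil => exact ⟨[], by simp [PySem.Chars.splitOn.go]⟩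
    | cons c rest =>
      by_cases hc : c = '!'
      · subst hc
        obtain ⟨r2, hr2⟩ := ih rest [] (cur.reverse :: acc) (by simp at hs ⊢; omega)
        refine ⟨rest.takeWhile (· ≠ '!') :: r2, ?_⟩
        simp only [PySem.Chars.splitOn.go, List.isPrefixOf, List.takeWhile_cons] at hr2 ⊢
        simp [hr2]
      · obtain ⟨r2, hr2⟩ := ih rest (c :: cur) acc (by simp at hs ⊢; omega)
        refine ⟨r2, ?_⟩
        simp only [PySem.Chars.splitOn.go, List.isPrefixOf, List.takeWhile_cons] at hr2 ⊢
        simp [hr2, hc, Ne.symm hc]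

theorem pv_splitOn_head (g : List Char) :
    ∃ rest, PySem.Chars.splitOn g ['!'] = g.takeWhile (· ≠ '!') :: rest := by
  obtain ⟨r, hr⟩ := pv_go_head (g.length + 1) g [] [] (by omega)
  exact ⟨r, by simpa [PySem.Chars.splitOn] using hr⟩

-- intrinsic value of one ball, given the value of the previous ball
def pvCval (c : Char) (p : Int) : Int :=
  if PySem.Chars.isdigit c then (PySem.Int.ofChars? [c]).getD 0
  else if c = 'X' then 10
  else if c = '/' then 10 - p
  else 0

-- recursion computing B's first-pass table
def pvValsRec : List Char → Int → List Int
  | [], _ => []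
  | c :: cs, p => pvCval c p :: pvValsRec cs (pvCval c p)

theorem pvFoldVals (cs : List Char) (acc : List Int) :
    cs.foldl (fun vals c =>
      vals ++ [if PySem.Chars.isdigit c then (PySem.Int.ofChars? [c]).getD 0
               else if c = 'X' then 10
               else if c = '/' then 10 - (if vals.isEmpty then 0 else PySem.List.pyGetD vals (-1) 0)
               else 0]) acc
    = acc ++ pvValsRec cs ((acc.getLast?).getD 0) := by
  induction cs generalizing acc with
  | nil => simp [pvValsRec]
  | cons c cs ih =>
    have hv : (if PySem.Chars.isdigit c then (PySem.Int.ofChars? [c]).getD 0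
               else if c = 'X' then (10:Int)
               else if c = '/' then 10 - (if acc.isEmpty then 0 else PySem.List.pyGetD acc (-1) 0)
               else 0) = pvCval c ((acc.getLast?).getD 0) := by
      unfold pvCval
      cases hacc : acc with
      | nil => simp
      | cons a as =>
        have hne : acc ≠ [] := by simp [hacc]
        rw [← hacc]
        simp [hne, PySem.List.pyGetD_neg_one _ _ hne, List.getLast?_eq_some_getLast hne]
    simp only [List.foldl_cons, hv, ih, List.getLast?_concat, pvValsRec]
    simp

theorem pvValsRec_getD_ne_slash : ∀ (cs : List Char) (p : Int) (j : Nat), j < cs.length →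
    cs.getD j ' ' ≠ '/' → (pvValsRec cs p).getD j 0 = pvCval (cs.getD j ' ') 0 := by
  intro cs
  induction cs with
  | nil => intro p j h; simp at h
  | cons c cs ih =>
    intro p j hj hne
    cases j with
    | zero =>
      simp only [List.getD_cons_zero, pvValsRec] at hne ⊢
      unfold pvCval
      split_ifs <;> simp_all
    | succ j =>
      simp only [List.getD_cons_succ, pvValsRec] at hne ⊢
      exact ih _ j (by simpa using hj) hne

theorem pvValsRec_getD_slash : ∀ (cs : List Char) (p : Int) (j : Nat), 1 ≤ j → j < cs.length →
    cs.getD j ' ' = '/' → (pvValsRec cs p).getD j 0 = 10 - (pvValsRec cs p).getD (j - 1) 0 := by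
  intro cs
  induction cs with
  | nil => intro p j h1 h; simp at h
  | cons c cs ih =>
    intro p j h1 hj hsl
    obtain ⟨j', rfl⟩ : ∃ j', j = j' + 1 := ⟨j - 1, by omega⟩
    cases j' with
    | zero =>
      cases cs with
      | nil => simp at hj
      | cons c2 cs2 =>
        simp only [List.getD_cons_succ, List.getD_cons_zero] at hsl ⊢
        simp only [pvValsRec]
        rw [hsl]
        have : PySem.Chars.isdigit '/' = false := by decide
        simp [pvCval, this]
    | succ j'' =>
      simp only [List.getD_cons_succ, pvValsRec] at hsl ⊢
      have := ih (pvCval c p) (j'' + 1) (by omega) (by simpa using hj) hsl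
      simpa using this

theorem pvCval_digit (c : Char) (h : PySem.Chars.isdigit c = true) :
    pvCval c 0 = (PySem.Int.ofChars? [c]).getD 0 := by
  unfold pvCval; rw [if_pos h]

theorem pv_digit_ne_slash (c : Char) (h : PySem.Chars.isdigit c = true) : c ≠ '/' := by
  intro e; rw [e] at h; exact absurd h (by decide)

theorem pv_digit_ne_X (c : Char) (h : PySem.Chars.isdigit c = true) : c ≠ 'X' := by
  intro e; rw [e] at h; exact absurd h (by decide)

theorem pv_replace_ne (c : Char) (h : c ≠ 'X') :
    PySem.Chars.replace [c] ['X'] ['1', '0'] = [c] := by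
  simp [PySem.Chars.replace, PySem.Chars.replace.go, List.isPrefixOf, Ne.symm h]

theorem pv_getD_all (balls bonus : List Char) (j : Nat) (hj : j < balls.length) :
    (balls ++ bonus ++ ['0', '0']).getD j ' ' = balls.getD j ' ' := by
  rw [List.append_assoc]
  exact List.getD_append _ _ _ _ hj


-- B's second-pass value of the ball at index k (ic = (k, ball)), over a value table vals
def pvBVal (vals : List Int) (ic : Int × Char) : Int :=
  if PySem.Chars.isdigit ic.2 then PySem.List.pyGetD vals ic.1 0
  else if ic.2 = '/' then PySem.List.pyGetD vals ic.1 0 + PySem.List.pyGetD vals (ic.1 + 1) 0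
  else if ic.2 = 'X' then 10 + PySem.List.pyGetD vals (ic.1 + 1) 0 + PySem.List.pyGetD vals (ic.1 + 2) 0
  else 0

theorem pv_elem (g balls bonus : List Char) (k : Nat)
    (hb : balls <+: g) (hk : k < balls.length)
    (hcl : PySem.Chars.isdigit (balls.getD k ' ') = true ∨
      (balls.getD k ' ' = '/' ∧ 1 ≤ k ∧
        PySem.Chars.isdigit (balls.getD (k - 1) ' ') = true ∧
        (PySem.Chars.isdigit ((balls ++ bonus ++ ['0','0']).getD (k + 1) ' ') = true ∨ (balls ++ bonus ++ ['0','0']).getD (k + 1) ' ' = 'X')) ∨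
      (balls.getD k ' ' = 'X' ∧
        ((balls ++ bonus ++ ['0','0']).getD (k + 2) ' ' = '/' ∨
          ((PySem.Chars.isdigit ((balls ++ bonus ++ ['0','0']).getD (k + 1) ' ') = true ∨ (balls ++ bonus ++ ['0','0']).getD (k + 1) ' ' = 'X') ∧
           (PySem.Chars.isdigit ((balls ++ bonus ++ ['0','0']).getD (k + 2) ' ') = true ∨ (balls ++ bonus ++ ['0','0']).getD (k + 2) ' ' = 'X'))))) :
    (if PySem.Chars.isdigit (balls.getD k ' ') then (PySem.Int.ofChars? [balls.getD k ' ']).getD 0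
     else if balls.getD k ' ' = '/' then
       (10 - (PySem.Int.ofChars? [PySem.List.pyGetD g ((k : Int) - 1) ' ']).getD 0)
         + (PySem.Int.ofChars? (PySem.Chars.replace [PySem.List.pyGetD (balls ++ bonus ++ ['0','0']) ((k : Int) + 1) ' '] ['X'] ['1','0'])).getD 0
     else if balls.getD k ' ' = 'X' then
       10 + (if [PySem.List.pyGetD (balls ++ bonus ++ ['0','0']) ((k : Int) + 2) ' '] = ['/'] then (10 : Int)
             else (PySem.Int.ofChars? (PySem.Chars.replace [PySem.List.pyGetD (balls ++ bonus ++ ['0','0']) ((k : Int) + 1) ' '] ['X'] ['1','0'])).getD 0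
               + (PySem.Int.ofChars? (PySem.Chars.replace [PySem.List.pyGetD (balls ++ bonus ++ ['0','0']) ((k : Int) + 2) ' '] ['X'] ['1','0'])).getD 0)
     else 0)
    = pvBVal (pvValsRec (balls ++ bonus ++ ['0','0']) 0) ((k : Int), balls.getD k ' ') := by
  have e1 : ((k : Int) + 1) = ((k + 1 : Nat) : Int) := by omega
  have e2 : ((k : Int) + 2) = ((k + 2 : Nat) : Int) := by omega
  have hlall : (balls ++ bonus ++ ['0','0']).length = balls.length + bonus.length + 2 := by
    simp; omega
  rcases hcl with hd | ⟨hsl, hk1, hprev, hnext⟩ | ⟨hX, hbb⟩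
  · -- digit ball
    rw [pvBVal]
    simp only [hd, if_pos]
    rw [PySem.List.pyGetD_natCast]
    rw [pvValsRec_getD_ne_slash _ 0 k (by omega)
      (by rw [pv_getD_all _ _ _ hk]; exact pv_digit_ne_slash _ hd)]
    rw [pv_getD_all _ _ _ hk]
    exact (pvCval_digit _ hd).symm
  · -- spare ball
    rw [pvBVal]
    simp only [hsl, reduceIte, show PySem.Chars.isdigit '/' = false from by decide,
      Bool.false_eq_true]
    have e0 : ((k : Int) - 1) = ((k - 1 : Nat) : Int) := by omega
    have hlb : k - 1 < balls.length := by omega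
    have hlg : k - 1 < g.length := lt_of_lt_of_le hlb hb.length_le
    have hgb : g.getD (k - 1) ' ' = balls.getD (k - 1) ' ' := by
      rw [List.getD_eq_getElem _ _ hlg, List.getD_eq_getElem _ _ hlb]
      exact (hb.getElem hlb).symm
    rw [e0, e1]
    simp only [PySem.List.pyGetD_natCast]
    rw [hgb]
    rw [pvValsRec_getD_slash _ 0 k hk1 (by omega) (by rw [pv_getD_all _ _ _ hk]; exact hsl)]
    rw [pvValsRec_getD_ne_slash _ 0 (k - 1) (by omega)
      (by rw [pv_getD_all _ _ _ hlb]; exact pv_digit_ne_slash _ hprev)]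
    rw [pv_getD_all _ _ _ hlb]
    have hnv : ((pvValsRec (balls ++ bonus ++ ['0','0']) 0).getD (k + 1) 0)
        = (PySem.Int.ofChars? (PySem.Chars.replace [(balls ++ bonus ++ ['0','0']).getD (k + 1) ' '] ['X'] ['1','0'])).getD 0 := by
      rcases hnext with hd1 | hx1
      · rw [pvValsRec_getD_ne_slash _ 0 (k + 1) (by omega) (pv_digit_ne_slash _ hd1),
          pv_replace_ne _ (pv_digit_ne_X _ hd1)]
        exact pvCval_digit _ hd1
      · rw [pvValsRec_getD_ne_slash _ 0 (k + 1) (by omega) (by rw [hx1]; decide), hx1]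
        decide
    rw [hnv, pvCval_digit _ hprev]
  · -- strike ball
    rw [pvBVal]
    simp only [hX, reduceIte, show PySem.Chars.isdigit 'X' = false from by decide,
      show ¬(('X' : Char) = '/') from by decide, Bool.false_eq_true]
    rw [e1, e2]
    simp only [PySem.List.pyGetD_natCast]
    by_cases h2 : (balls ++ bonus ++ ['0','0']).getD (k + 2) ' ' = '/'
    · -- a spare right after the bonus ball: both sides total 20
      rw [pvValsRec_getD_slash _ 0 (k + 2) (by omega) (by omega) h2]
      simp only [h2, reduceIte, show k + 2 - 1 = k + 1 from rfl]
      omega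
    · rcases hbb with h2' | ⟨hn1, hn2⟩
      · exact absurd h2' h2
      have hval : ∀ j, j < (balls ++ bonus ++ ['0','0']).length →
          (PySem.Chars.isdigit ((balls ++ bonus ++ ['0','0']).getD j ' ') = true ∨ (balls ++ bonus ++ ['0','0']).getD j ' ' = 'X') →
          ((pvValsRec (balls ++ bonus ++ ['0','0']) 0).getD j 0)
            = (PySem.Int.ofChars? (PySem.Chars.replace [(balls ++ bonus ++ ['0','0']).getD j ' '] ['X'] ['1','0'])).getD 0 := by
        intro j hj hok
        rcases hok with hd1 | hx1
        · rw [pvValsRec_getD_ne_slash _ 0 j hj (pv_digit_ne_slash _ hd1),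
            pv_replace_ne _ (pv_digit_ne_X _ hd1)]
          exact pvCval_digit _ hd1
        · rw [pvValsRec_getD_ne_slash _ 0 j hj (by rw [hx1]; decide), hx1]
          decide
      rw [if_neg (by simpa using h2)]
      rw [hval (k + 1) (by omega) hn1, hval (k + 2) (by omega) hn2]
      omega


theorem pvBfold (balls : List Char) (vals : List Int)
    (h : ∀ k, k < balls.length → PySem.Chars.isdigit (balls.getD k ' ') = true ∨
      balls.getD k ' ' = '/' ∨ balls.getD k ' ' = 'X') :
    List.foldl (fun (result : List Int) (ic : Int × Char) =>
      if PySem.Chars.isdigit ic.2 then result ++ [PySem.List.pyGetD vals ic.1 0]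
      else if ic.2 = '/' then result ++ [PySem.List.pyGetD vals ic.1 0 + PySem.List.pyGetD vals (ic.1 + 1) 0]
      else if ic.2 = 'X' then result ++ [10 + PySem.List.pyGetD vals (ic.1 + 1) 0 + PySem.List.pyGetD vals (ic.1 + 2) 0]
      else result) [] (PySem.List.enumerate balls)
    = List.map (pvBVal vals) (PySem.List.enumerate balls) := by
  rw [PySem.List.foldl_congr_mem _ _ (fun (r : List Int) ic => r ++ [pvBVal vals ic]) [] ?_]
  · simpa using PySem.List.foldl_append_singleton_eq_map (pvBVal vals) (PySem.List.enumerate balls) []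
  · intro acc x hx
    obtain ⟨k, hk, rfl⟩ := (PySem.List.mem_enumerate_iff _ _ _).mp hx
    have hget : balls[k] = balls.getD k ' ' := (List.getD_eq_getElem _ _ hk).symm
    rcases h k hk with hd | hs | hX
    · simp only [pvBVal, hget, hd, if_pos]
    · simp only [pvBVal, hget, hs, reduceIte,
        show PySem.Chars.isdigit '/' = false from by decide, Bool.false_eq_true]
    · simp only [pvBVal, hget, hX, reduceIte,
        show PySem.Chars.isdigit 'X' = false from by decide,
        show ¬(('X' : Char) = '/') from by decide, Bool.false_eq_true]

-- ===== VERDICT (by name: the statement is the Claim_ definition above) =====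
theorem convert_score_to_number_list_spec : Claim_equal_convert_score_to_number_list := by
  intro score _ hp
  unfold Spec_convert_score_to_number_list
  obtain ⟨rest, hsp⟩ := pv_splitOn_head (score.toList ++ ['!'])
  unfold Pre_convert_score_to_number_list pvAll pvBalls at hp
  rw [hsp] at hp
  simp only [List.getD_cons_zero, List.getD_cons_succ] at hp
  simp only [convert_score_to_number_list, convert_score_to_number_list_alt]
  rw [hsp]
  simp only [List.getD_cons_zero, List.getD_cons_succ]
  rw [pvFoldVals]
  simp only [List.nil_append, List.getLast?_nil, Option.getD_none]
  rw [pvBfold _ _ (fun k hk => by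
    rcases hp k hk with h | h | h
    exacts [Or.inl h, Or.inr (Or.inl h.1), Or.inr (Or.inr h.1)])]
  rw [PySem.List.foldl_append_singleton_eq_map]
  simp only [List.nil_append]
  refine List.map_congr_left ?_
  intro ic hic
  obtain ⟨k, hk, rfl⟩ := (PySem.List.mem_enumerate_iff _ _ _).mp hic
  simp only [zero_add]
  have hget : ((score.toList ++ ['!']).takeWhile (· ≠ '!'))[k]
      = ((score.toList ++ ['!']).takeWhile (· ≠ '!')).getD k ' ' :=
    (List.getD_eq_getElem _ _ hk).symm
  rw [hget]
  exact pv_elem _ _ _ k (List.takeWhile_prefix _) hk (hp k hk)
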